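-- pv_equiv track=rewrite | github.com/bbambi1/Vigenere-Cipher-Analysis-Tool | vigenere.py | deduce_key
-- ===== SOURCE A (Python) =====
-- from collections import Counter
--
-- def deduce_key(cipher_text, key_length):
--     """
--     Deduce the key using frequency analysis.
--     """
--     key = ""
--     for i in range(key_length):
--         segment = cipher_text[i::key_length]
--         freqs = Counter(segment)
--         most_common = freqs.most_common(1)[0][0]
--         shift = (ord(most_common.upper()) - ord('E')) % 26
--         key_char = chr(ord('A') + shift)
--         key += key_char
--     return key
-- ===== SOURCE B (Python) =====
-- from collections import Counter
--
-- def deduce_key(cipher_text, key_length):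
--     """
--     Deduce the key using frequency analysis.
--     """
--     counters = [Counter() for _ in range(key_length)]
--     if key_length > 0:
--         for i, ch in enumerate(cipher_text):
--             counters[i % key_length][ch] += 1
--     key_chars = []
--     for freqs in counters:
--         most_common = freqs.most_common(1)[0][0]
--         shift = (ord(most_common.upper()) - ord('E')) % 26
--         key_chars.append(chr(ord('A') + shift))
--     return "".join(key_chars)
-- ===== Notes on version B (the rewrite author's own statement) =====
-- stated objective: alternative
-- what changed: A makes key_length separate stride-k slicing passes over the text, building a Counter per slice; B makes one sequential pass over enumerate(cipher_text), distributing each character into counters[i % key_length], then reads the key off the counter list.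
import Mathlib
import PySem

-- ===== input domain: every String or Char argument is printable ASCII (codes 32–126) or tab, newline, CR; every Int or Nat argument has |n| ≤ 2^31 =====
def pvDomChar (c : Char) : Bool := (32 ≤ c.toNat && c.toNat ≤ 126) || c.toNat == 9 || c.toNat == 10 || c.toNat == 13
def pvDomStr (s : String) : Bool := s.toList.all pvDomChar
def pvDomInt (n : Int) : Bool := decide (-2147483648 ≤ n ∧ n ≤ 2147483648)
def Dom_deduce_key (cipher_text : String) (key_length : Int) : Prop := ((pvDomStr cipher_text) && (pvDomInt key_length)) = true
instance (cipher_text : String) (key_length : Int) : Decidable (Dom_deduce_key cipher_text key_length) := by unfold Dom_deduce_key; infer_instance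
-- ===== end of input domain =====

-- B replaces A's key_length slicing passes (one Counter per slice) by ONE left-to-right pass over
-- enumerate(cipher_text) that distributes each character into counters[i % key_length]; objective: alternative.

-- ===== PORT A =====
-- key is accumulated as a List Char (Python's str concatenation), made a String at the end.
-- The .getD "" behind slice? is never reached: inside the loop key_length ≥ 1, so the step is non-zero.
-- most_common(1)[0][0] is CPython's: counts sorted descending, stable (insertion order on ties);
-- the default (' ', 0) of pyGetD is never reached under Pre_ (every slice is nonempty there).
def deduce_key (cipher_text : String) (key_length : Int) : String :=
  String.ofList ((PySem.List.pyRange 0 key_length 1).foldl (fun key i =>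
    let segment := (PySem.Str.slice? cipher_text (some i) none key_length).getD ""
    let freqs := PySem.Dict.counter segment.toList
    let most_common := (PySem.List.pyGetD (PySem.List.sorted freqs.items (fun p => p.2) true) 0 (' ', 0)).1
    let shift := PySem.Int.mod (((PySem.Chars.upperChar most_common).toNat : Int) - 69) 26
    let key_char := Char.ofNat (65 + shift).toNat
    key ++ [key_char]) [])

-- ===== PORT B =====
-- B's distribution step: counters[i % key_length][ch] += 1
def pvStep (k : Int) (cs : List (PySem.Dict Char Int)) (p : Int × Char) : List (PySem.Dict Char Int) :=
  let j := (PySem.Int.mod p.1 k).toNat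
  cs.set j ((cs.getD j PySem.Dict.empty).modify p.2 0 (· + 1))

-- the 'if 0 < key_length' is Source B's own 'if key_length > 0:' guard around the single pass
def deduce_key_alt (cipher_text : String) (key_length : Int) : String :=
  let counters0 := (PySem.List.pyRange 0 key_length 1).map (fun _ => (PySem.Dict.empty : PySem.Dict Char Int))
  let counters :=
    if 0 < key_length then
      (PySem.List.enumerate cipher_text.toList 0).foldl (pvStep key_length) counters0
    else counters0
  String.ofList (counters.map (fun freqs =>
    let most_common := (PySem.List.pyGetD (PySem.List.sorted freqs.items (fun p => p.2) true) 0 (' ', 0)).1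
    let shift := PySem.Int.mod (((PySem.Chars.upperChar most_common).toNat : Int) - 69) 26
    Char.ofNat (65 + shift).toNat))

-- ===== PRECONDITION & SPEC =====
-- Pre_ excludes exactly the inputs where A raises IndexError: key_length > len(cipher_text)
-- leaves some slice cipher_text[i::key_length] empty, so most_common(1)[0] raises (B raises there too).
def Pre_deduce_key (cipher_text : String) (key_length : Int) : Prop :=
  key_length ≤ PySem.Str.len cipher_text
instance (cipher_text : String) (key_length : Int) : Decidable (Pre_deduce_key cipher_text key_length) := by
  unfold Pre_deduce_key; infer_instance

def pvWitness_deduce_key : String × Int := ("attack at dawn", 3)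

def Spec_deduce_key (cipher_text : String) (key_length : Int) (out : String) : Prop := out = deduce_key_alt cipher_text key_length
instance (cipher_text : String) (key_length : Int) (out : String) : Decidable (Spec_deduce_key cipher_text key_length out) := by unfold Spec_deduce_key; infer_instance

-- ===== CLAIM (what is proved, stated in full; the proofs are below) =====
def Claim_equal_deduce_key : Prop := ∀ (cipher_text : String) (key_length : Int), Dom_deduce_key cipher_text key_length → Pre_deduce_key cipher_text key_length → Spec_deduce_key cipher_text key_length (deduce_key cipher_text key_length)

-- ===== LEMMAS AND PROOFS =====

-- proof-only name for the per-counter key-char computation both Pythons share line for line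
def pvKC (freqs : PySem.Dict Char Int) : Char :=
  let most_common := (PySem.List.pyGetD (PySem.List.sorted freqs.items (fun p => p.2) true) 0 (' ', 0)).1
  let shift := PySem.Int.mod (((PySem.Chars.upperChar most_common).toNat : Int) - 69) 26
  Char.ofNat (65 + shift).toNat

lemma deduce_key_eq (ct : String) (kl : Int) :
    deduce_key ct kl = String.ofList ((PySem.List.pyRange 0 kl 1).foldl (fun key i =>
      key ++ [pvKC (PySem.Dict.counter ((PySem.Str.slice? ct (some i) none kl).getD "").toList)]) []) := rfl

lemma deduce_key_alt_eq (ct : String) (kl : Int) :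
    deduce_key_alt ct kl = String.ofList
      ((if 0 < kl then
          (PySem.List.enumerate ct.toList 0).foldl (pvStep kl)
            ((PySem.List.pyRange 0 kl 1).map (fun _ => (PySem.Dict.empty : PySem.Dict Char Int)))
        else
          (PySem.List.pyRange 0 kl 1).map (fun _ => (PySem.Dict.empty : PySem.Dict Char Int))).map pvKC) := rfl

def pvPickD : List Char → Nat → Nat → List Char
  | [], _, _ => []
  | c :: cs, d, k => if d = 0 then c :: pvPickD cs (k - 1) k else pvPickD cs (d - 1) k

lemma pvPickD_drop (k : Nat) : ∀ (xs : List Char) (d : Nat), pvPickD xs d k = pvPickD (xs.drop d) 0 k := by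
  intro xs
  induction xs with
  | nil => intro d; simp [pvPickD]
  | cons c cs ih =>
    intro d
    cases d with
    | zero => simp
    | succ d => simpa [pvPickD] using ih d

lemma pvCeil_step (k m : Nat) (hk : 0 < k) (hm : 1 ≤ m) :
    (m + k - 1) / k = ((m - k) + k - 1) / k + 1 := by
  by_cases h : m ≤ k
  · have h1 : m + k - 1 = (m - 1) + 1 * k := by omega
    have h2 : (m - k) + k - 1 = k - 1 := by omega
    rw [h1, h2, Nat.add_mul_div_right _ _ hk, Nat.div_eq_of_lt (by omega), Nat.div_eq_of_lt (by omega)]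
  · have h1 : m + k - 1 = ((m - k) + k - 1) + 1 * k := by omega
    rw [h1, Nat.add_mul_div_right _ _ hk]

lemma pvRangeMap (k : Nat) (hk : 0 < k) : ∀ (n : Nat) (ys : List Char), ys.length ≤ n →
    (List.range ((ys.length + k - 1) / k)).filterMap (fun m => ys[k * m]?) = pvPickD ys 0 k := by
  intro n
  induction n with
  | zero =>
    intro ys hy
    have : ys = [] := List.eq_nil_of_length_eq_zero (by omega)
    subst this
    simp [pvPickD]
  | succ n ih =>
    intro ys hy
    match ys with
    | [] => simp [pvPickD]
    | y :: t =>
      have hm : 1 ≤ (y :: t).length := by simp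
      rw [pvCeil_step k _ hk hm]
      rw [List.range_succ_eq_map]
      rw [List.filterMap_cons]
      simp only [Nat.mul_zero, List.getElem?_cons_zero]
      rw [List.filterMap_map]
      have harg : ∀ m : Nat, ((fun m => (y :: t)[k * m]?) ∘ Nat.succ) m = (fun m => (t.drop (k-1))[k * m]?) m := by
        intro m
        simp only [Function.comp]
        rw [List.getElem?_drop]
        have h1 : k * (m + 1) = (k - 1 + k * m) + 1 := by
          rw [Nat.mul_succ]; omega
        rw [h1, List.getElem?_cons_succ]
      have hlen : (t.drop (k-1)).length = (y :: t).length - k := by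
        simp; omega
      rw [funext harg]
      rw [← hlen]
      rw [ih (t.drop (k-1)) (by simp at hy ⊢; omega)]
      rw [← pvPickD_drop]
      show _ = pvPickD (y :: t) 0 k
      simp [pvPickD]

lemma pvSliceA (xs : List Char) (k : Nat) (hk : 0 < k) (j : Nat) (hj : j < xs.length) :
    PySem.List.slice? xs (some (j : Int)) none (k : Int) = some (pvPickD (xs.drop j) 0 k) := by
  have hk0 : (k : Int) ≠ 0 := by exact_mod_cast hk.ne'
  rw [PySem.List.slice?]
  rw [if_neg hk0]
  simp only [PySem.List.sliceIndices]
  have hlt : ¬ ((k : Int) < 0) := by omega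
  have hjlt : ¬ ((j : Int) < 0) := by omega
  have hmin : min (j : Int) (xs.length : Int) = (j : Int) := by omega
  simp only [if_neg hlt, if_neg hjlt, hmin, if_pos (show (0:Int) < (k:Int) by omega),
    if_pos (show (j : Int) < (xs.length : Int) by exact_mod_cast hj)]
  have hcnt : (((xs.length : Int) - (j : Int) + (k : Int) - 1) / (k : Int)).toNat
      = ((xs.drop j).length + k - 1) / k := by
    have h1 : ((xs.length : Int) - (j : Int) + (k : Int) - 1) = (((xs.length - j + k - 1 : Nat)) : Int) := by
      omega
    rw [h1, ← Int.natCast_div, Int.toNat_natCast]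
    simp
  rw [hcnt]
  rw [← pvRangeMap k hk (xs.drop j).length (xs.drop j) le_rfl]
  congr 1
  apply List.filterMap_congr
  intro m _
  have h2 : ((j : Int) + (k : Int) * (m : Int)).toNat = j + k * m := by
    omega
  rw [h2, List.getElem?_drop]

lemma pvStep_length (k : Int) (cs : List (PySem.Dict Char Int)) (p : Int × Char) :
    (pvStep k cs p).length = cs.length := by
  simp [pvStep]

def pvDist (j s k : Nat) : Nat := if s % k ≤ j then j - s % k else j + k - s % k

lemma pvDist_succ_self {j s k : Nat} (hj : j < k) (h : s % k = j) : pvDist j (s + 1) k = k - 1 := by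
  have hr : (s + 1) % k = (j + 1) % k := by rw [← Nat.mod_add_mod, h]
  by_cases hc : j + 1 = k
  · have : (s + 1) % k = 0 := by rw [hr, hc, Nat.mod_self]
    simp [pvDist, this]; omega
  · have : (s + 1) % k = j + 1 := by rw [hr, Nat.mod_eq_of_lt (by omega)]
    simp [pvDist, this]; omega

lemma pvDist_succ_ne {j s k : Nat} (hj : j < k) (h : s % k ≠ j) :
    pvDist j s k = pvDist j (s + 1) k + 1 := by
  have hs : s % k < k := Nat.mod_lt _ (by omega)
  have hr : (s + 1) % k = (s % k + 1) % k := by rw [Nat.mod_add_mod]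
  by_cases hc : s % k + 1 = k
  · have h0 : (s + 1) % k = 0 := by rw [hr, hc, Nat.mod_self]
    unfold pvDist
    rw [h0]
    simp only [Nat.zero_le, if_pos]
    have : ¬ (s % k ≤ j) := by omega
    rw [if_neg this]; omega
  · have h0 : (s + 1) % k = s % k + 1 := by rw [hr, Nat.mod_eq_of_lt (by omega)]
    unfold pvDist
    rw [h0]
    by_cases hle : s % k ≤ j
    · have : s % k + 1 ≤ j := by omega
      rw [if_pos hle, if_pos this]; omega
    · rw [if_neg hle, if_neg (by omega)]; omega

lemma pvDist_self {j s k : Nat} (h : s % k = j) : pvDist j s k = 0 := by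
  simp [pvDist, h]

lemma pvFoldB (k : Nat) (hk : 0 < k) (j : Nat) (hj : j < k) :
    ∀ (xs : List Char) (s : Nat) (cs : List (PySem.Dict Char Int)), cs.length = k →
    ((PySem.List.enumerate xs (s : Int)).foldl (pvStep (k : Int)) cs).getD j PySem.Dict.empty
      = (pvPickD xs (pvDist j s k) k).foldl (fun d c => d.modify c 0 (· + 1)) (cs.getD j PySem.Dict.empty) := by
  intro xs
  induction xs with
  | nil => intro s cs hcs; simp [PySem.List.enumerate, pvPickD]
  | cons x xs ih =>
    intro s cs hcs
    rw [PySem.List.enumerate_cons, List.foldl_cons]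
    have hs1 : ((s : Int) + 1) = ((s + 1 : Nat) : Int) := by push_cast; ring
    rw [hs1, ih (s + 1) (pvStep (k : Int) cs ((s : Int), x)) (by rw [pvStep_length]; exact hcs)]
    have hstep : pvStep (k : Int) cs ((s : Int), x)
        = cs.set (s % k) ((cs.getD (s % k) PySem.Dict.empty).modify x 0 (· + 1)) := by
      have hmod : (PySem.Int.mod ((s : Nat) : Int) ((k : Nat) : Int)).toNat = s % k := by
        rw [PySem.Int.mod_natCast]; exact Int.toNat_natCast _
      simp only [pvStep]
      rw [hmod]
    rw [hstep]
    have hsk : s % k < cs.length := by rw [hcs]; exact Nat.mod_lt _ hk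
    by_cases hcase : s % k = j
    · have hset : (cs.set (s % k) ((cs.getD (s % k) PySem.Dict.empty).modify x 0 (· + 1))).getD j PySem.Dict.empty
          = (cs.getD j PySem.Dict.empty).modify x 0 (· + 1) := by
        subst hcase
        rw [List.getD_eq_getElem _ _ (by simpa using hsk), List.getElem_set_self,
          List.getD_eq_getElem _ _ hsk]
      rw [hset, pvDist_succ_self hj hcase, pvDist_self hcase]
      simp [pvPickD]
    · have hset : (cs.set (s % k) ((cs.getD (s % k) PySem.Dict.empty).modify x 0 (· + 1))).getD j PySem.Dict.empty
          = cs.getD j PySem.Dict.empty := by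
        by_cases hjlen : j < cs.length
        · rw [List.getD_eq_getElem _ _ (by simpa using hjlen), List.getElem_set_ne (by omega),
            List.getD_eq_getElem _ _ hjlen]
        · omega
      rw [hset, pvDist_succ_ne hj hcase]
      simp [pvPickD]

lemma pvFoldB_length (k : Int) : ∀ (l : List (Int × Char)) (cs : List (PySem.Dict Char Int)),
    (l.foldl (pvStep k) cs).length = cs.length := by
  intro l
  induction l with
  | nil => intro cs; rfl
  | cons p l ih => intro cs; simp [List.foldl_cons, ih, pvStep_length]

lemma pvRange_nonpos (k : Int) (h : k ≤ 0) : PySem.List.pyRange 0 k 1 = [] := by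
  rw [PySem.List.pyRange]
  rw [if_neg (by norm_num : (1:Int) ≠ 0), if_pos (by norm_num : (0:Int) < 1),
    if_neg (by omega : ¬ (0:Int) < k)]
  simp

-- ===== VERDICT (by name: the statement is the Claim_ definition above) =====
theorem deduce_key_spec : Claim_equal_deduce_key := by
  intro ct kl _hdom hpre
  unfold Spec_deduce_key
  unfold Pre_deduce_key at hpre
  rw [PySem.Str.len_eq] at hpre
  rw [deduce_key_eq, deduce_key_alt_eq]
  by_cases hkl : 0 < kl
  · obtain ⟨k, rfl⟩ : ∃ k : Nat, kl = (k : Int) :=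
      ⟨kl.toNat, (Int.toNat_of_nonneg (le_of_lt hkl)).symm⟩
    have hk : 0 < k := by exact_mod_cast hkl
    have hkn : k ≤ ct.toList.length := by exact_mod_cast hpre
    simp only [if_pos hkl]
    rw [PySem.List.foldl_append_singleton_eq_map
      (fun i => pvKC (PySem.Dict.counter
        ((PySem.Str.slice? ct (some i) none (k : Int)).getD "").toList))]
    rw [List.nil_append]
    congr 1
    have hlen0 : ((PySem.List.pyRange 0 (k : Int) 1).map
        (fun _ => (PySem.Dict.empty : PySem.Dict Char Int))).length = k := by
      rw [PySem.List.pyRange_zero_natCast]; simp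
    apply List.ext_getElem
    · simp only [List.length_map, pvFoldB_length, PySem.List.pyRange_zero_natCast,
        List.length_range]
    · intro i h1 h2
      have hi : i < k := by
        simpa [PySem.List.pyRange_zero_natCast] using h1
      have hA : (List.map (fun i => pvKC (PySem.Dict.counter
          ((PySem.Str.slice? ct (some i) none (k : Int)).getD "").toList))
          (PySem.List.pyRange 0 (k : Int) 1))[i]'h1
          = pvKC (PySem.Dict.counter
          ((PySem.Str.slice? ct (some ((i : Nat) : Int)) none (k : Int)).getD "").toList) := by
        apply Option.some_injective
        rw [← List.getElem?_eq_getElem h1]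
        exact PySem.List.getElem?_map_pyRange_zero _ k i hi
      rw [hA]
      rw [List.getElem_map]
      have hiB : i < (((PySem.List.enumerate ct.toList 0).foldl (pvStep (k : Int))
          ((PySem.List.pyRange 0 (k : Int) 1).map (fun _ => (PySem.Dict.empty : PySem.Dict Char Int))))).length := by
        rw [pvFoldB_length, hlen0]; exact hi
      rw [← List.getD_eq_getElem _ PySem.Dict.empty hiB]
      have hfold := pvFoldB k hk i hi ct.toList 0 _ hlen0
      simp only [Nat.cast_zero] at hfold
      rw [hfold]
      have hinit : ((PySem.List.pyRange 0 (k : Int) 1).map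
          (fun _ => (PySem.Dict.empty : PySem.Dict Char Int))).getD i PySem.Dict.empty
          = PySem.Dict.empty := by
        rw [List.getD_eq_getElem _ _ (by rw [hlen0]; exact hi), List.getElem_map]
      have hdist : pvDist i 0 k = i := by simp [pvDist]
      rw [hinit, hdist, ← PySem.Dict.counter_eq_foldl]
      have hslice : PySem.Str.slice? ct (some ((i : Nat) : Int)) none (k : Int)
          = some (String.ofList (pvPickD (ct.toList.drop i) 0 k)) := by
        rw [PySem.Str.slice?]
        have : PySem.Chars.slice? ct.toList (some ((i : Nat) : Int)) none (k : Int)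
            = some (pvPickD (ct.toList.drop i) 0 k) :=
          pvSliceA ct.toList k hk i (by omega)
        rw [this, Option.map_some]
      rw [hslice]
      rw [Option.getD_some]
      rw [String.toList_ofList]
      rw [← pvPickD_drop]
  · simp only [if_neg hkl]
    rw [pvRange_nonpos kl (by omega)]
    simp
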